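-- pv_equiv track=rewrite | github.com/0110SuperUser0110/pathfinder | src/pathfinder/validation.py | _channel_name_errors
-- ===== SOURCE A (Python) =====
-- from collections import Counter, defaultdict
-- from typing import Any, Iterable
--
-- def _duplicate_values(values: Iterable[str]) -> list[str]:
--     counter = Counter(item for item in values if item)
--     return sorted([item for item, count in counter.items() if count > 1])
--
-- def _channel_name_errors(channel_names: list[str]) -> tuple[list[str], list[str]]:
--     errors: list[str] = []
--     warnings: list[str] = []
--     if not channel_names:
--         errors.append("channel_names must not be empty")
--         return errors, warnings
--     duplicates = _duplicate_values(channel_names)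
--     if duplicates:
--         errors.append("duplicate channel names: " + ", ".join(duplicates))
--     blanks = [repr(name) for name in channel_names if not str(name).strip()]
--     if blanks:
--         errors.append("blank channel names are not allowed")
--     malformed = [name for name in channel_names if any(ch.isspace() for ch in str(name))]
--     if malformed:
--         warnings.append("channel names contain whitespace: " + ", ".join(malformed))
--     return errors, warnings
-- ===== SOURCE B (Python) =====
-- def _channel_name_errors(channel_names):
--     if not channel_names:
--         return ["channel_names must not be empty"], []
--     errors = []
--     warnings = []
--     # Sort the non-empty names once; duplicates then sit adjacently, so one
--     # scan over neighbouring pairs yields the duplicate values already in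
--     # sorted order, each reported once (no Counter needed).
--     ordered = sorted(filter(None, channel_names))
--     duplicates = []
--     for prev, cur in zip(ordered, ordered[1:]):
--         if prev == cur and (not duplicates or duplicates[-1] != cur):
--             duplicates.append(cur)
--     if duplicates:
--         errors.append("duplicate channel names: " + ", ".join(duplicates))
--     if any(not name.strip() for name in channel_names):
--         errors.append("blank channel names are not allowed")
--     malformed = [name for name in channel_names if any(ch.isspace() for ch in name)]
--     if malformed:
--         warnings.append("channel names contain whitespace: " + ", ".join(malformed))
--     return errors, warnings
-- ===== Notes on version B (the rewrite author's own statement) =====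
-- stated objective: alternative
-- what changed: Duplicate detection is done by sorting the non-empty names once and scanning adjacent pairs (each repeated value emitted once, already in order) instead of building a Counter multiset and then sorting its over-counted keys; the blank check becomes a short-circuiting any() instead of a built repr list.
import Mathlib
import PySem

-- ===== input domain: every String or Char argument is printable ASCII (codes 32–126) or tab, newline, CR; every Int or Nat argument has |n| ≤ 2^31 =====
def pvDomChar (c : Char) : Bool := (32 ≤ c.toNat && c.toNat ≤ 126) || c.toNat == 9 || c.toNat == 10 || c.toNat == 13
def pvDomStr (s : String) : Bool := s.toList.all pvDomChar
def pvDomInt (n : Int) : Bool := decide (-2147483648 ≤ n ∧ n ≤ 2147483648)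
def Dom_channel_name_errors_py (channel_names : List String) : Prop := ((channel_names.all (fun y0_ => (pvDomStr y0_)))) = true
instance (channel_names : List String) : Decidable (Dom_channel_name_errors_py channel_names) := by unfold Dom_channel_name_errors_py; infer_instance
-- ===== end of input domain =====

-- B finds duplicates by sorting the non-empty names once and scanning adjacent pairs instead of
-- building a Counter and sorting its over-counted keys (objective: alternative algorithm, same cost).

-- ===== PORT A =====
-- repr(name): exact for the strings this comprehension is applied to on Dom (whitespace-only
-- ASCII strings, which contain no quote or backslash to escape)
def pyReprWS (s : String) : String :=
  "'" ++ String.ofList (s.toList.flatMap (fun c =>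
    if c = '\t' then ['\\', 't'] else if c = '\n' then ['\\', 'n']
    else if c = '\r' then ['\\', 'r'] else [c])) ++ "'"

def duplicate_values_py (values : List String) : List String :=
  let counter := PySem.Dict.counter (values.filter (fun item => !(item == "")))
  PySem.List.sorted ((counter.items.filter (fun p => decide ((1 : Int) < p.2))).map (·.1)) (fun x => x) false

def channel_name_errors_py (channel_names : List String) : List String × List String :=
  let errors : List String := []
  let warnings : List String := []
  if channel_names = [] then
    (errors ++ ["channel_names must not be empty"], warnings)
  else
    let duplicates := duplicate_values_py channel_names
    let errors := if duplicates ≠ [] then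
        errors ++ ["duplicate channel names: " ++ PySem.Str.join ", " duplicates] else errors
    let blanks := (channel_names.filter (fun name => PySem.Str.strip name == "")).map pyReprWS
    let errors := if blanks ≠ [] then errors ++ ["blank channel names are not allowed"] else errors
    let malformed := channel_names.filter (fun name => name.toList.any PySem.Chars.isspace)
    let warnings := if malformed ≠ [] then
        warnings ++ ["channel names contain whitespace: " ++ PySem.Str.join ", " malformed] else warnings
    (errors, warnings)

-- ===== PORT B =====
-- one step of B's loop over adjacent pairs of the sorted list:
-- if prev == cur and (not duplicates or duplicates[-1] != cur): duplicates.append(cur)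
def pvDupStep (acc : List String) (p : String × String) : List String :=
  if p.1 == p.2 && (decide (acc = []) || !(acc.getLast? == some p.2)) then acc ++ [p.2] else acc

def channel_name_errors_py_alt (channel_names : List String) : List String × List String :=
  if channel_names = [] then (["channel_names must not be empty"], [])
  else
    let ordered := PySem.List.sorted (channel_names.filter (fun n => !(n == ""))) (fun x => x) false
    -- zip(ordered, ordered[1:])
    let duplicates := (ordered.zip (PySem.List.slice ordered (some 1) none)).foldl pvDupStep []
    let errors : List String :=
      if duplicates ≠ [] then
        ["duplicate channel names: " ++ PySem.Str.join ", " duplicates] else []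
    let errors :=
      if channel_names.any (fun name => PySem.Str.strip name == "") then
        errors ++ ["blank channel names are not allowed"] else errors
    let malformed := channel_names.filter (fun name => name.toList.any PySem.Chars.isspace)
    let warnings : List String :=
      if malformed ≠ [] then
        ["channel names contain whitespace: " ++ PySem.Str.join ", " malformed] else []
    (errors, warnings)

-- ===== PRECONDITION & SPEC =====
def Spec_channel_name_errors_py (channel_names : List String) (out : List String × List String) : Prop := out = channel_name_errors_py_alt channel_names
instance (channel_names : List String) (out : List String × List String) : Decidable (Spec_channel_name_errors_py channel_names out) := by unfold Spec_channel_name_errors_py; infer_instance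

-- ===== CLAIM (what is proved, stated in full; the proofs are below) =====
def Claim_equal_channel_name_errors_py : Prop := ∀ (channel_names : List String), Dom_channel_name_errors_py channel_names → Spec_channel_name_errors_py channel_names (channel_name_errors_py channel_names)

-- ===== LEMMAS AND PROOFS =====

-- recursive description of B's adjacent-pair fold (proof-only)
def pvD (last : Option String) : List String → List String
  | [] => []
  | [_] => []
  | a :: b :: t => if a = b ∧ last ≠ some a then a :: pvD (some a) (b :: t) else pvD last (b :: t)

theorem pvFoldDup (o : List String) : ∀ (acc : List String),
    (o.zip o.tail).foldl pvDupStep acc = acc ++ pvD acc.getLast? o := by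
  induction o with
  | nil => intro acc; simp [pvD]
  | cons a t ih =>
    intro acc
    cases t with
    | nil => simp [pvD]
    | cons b t' =>
      have hz : (a :: b :: t').zip (a :: b :: t').tail = (a, b) :: ((b :: t').zip (b :: t').tail) := rfl
      rw [hz, List.foldl_cons]
      by_cases hab : a = b
      · subst hab
        by_cases hl : acc.getLast? = some a
        · have hne : acc ≠ [] := by intro h; rw [h] at hl; exact (by simp at hl)
          have hstep : pvDupStep acc (a, a) = acc := by
            simp [pvDupStep, hl, hne]
          rw [hstep, ih acc]
          have hD : pvD acc.getLast? (a :: a :: t') = pvD acc.getLast? (a :: t') := by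
            rw [hl]; simp [pvD]
          rw [hD]
        · have hstep : pvDupStep acc (a, a) = acc ++ [a] := by
            by_cases hacc : acc = [] <;> simp [pvDupStep, hl, hacc]
          rw [hstep, ih (acc ++ [a]), List.getLast?_concat]
          have hD : pvD acc.getLast? (a :: a :: t') = a :: pvD (some a) (a :: t') := by
            simp [pvD, hl]
          rw [hD]
          simp [List.append_assoc]
      · have hstep : pvDupStep acc (a, b) = acc := by simp [pvDupStep, hab]
        have hnc : ¬(a = b ∧ acc.getLast? ≠ some a) := fun h => hab h.1
        have hD : pvD acc.getLast? (a :: b :: t') = pvD acc.getLast? (b :: t') := by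
          simp only [pvD, if_neg hnc]
        rw [hstep, ih acc, hD]

theorem pvDSpec (o : List String) : ∀ (last : Option String),
    o.Pairwise (· ≤ ·) →
    (∀ l, last = some l → ∀ y ∈ o, l ≤ y) →
    (∀ x, x ∈ pvD last o ↔ 2 ≤ List.count x o ∧ last ≠ some x) ∧ (pvD last o).Pairwise (· < ·) := by
  induction o with
  | nil =>
    intro last _ _
    refine ⟨?_, by simp [pvD]⟩
    intro x; simp [pvD]
  | cons a t ih =>
    intro last hs hl
    cases t with
    | nil =>
      refine ⟨?_, by simp [pvD]⟩
      intro x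
      simp only [pvD, List.not_mem_nil, false_iff, not_and]
      intro hc
      exfalso
      simp only [List.count_cons, List.count_nil] at hc
      split at hc <;> omega
    | cons b t' =>
      have hs' : (b :: t').Pairwise (· ≤ ·) := hs.of_cons
      have hhead : ∀ y ∈ b :: t', a ≤ y := (List.pairwise_cons.mp hs).1
      have hab_le : a ≤ b := hhead b (by simp)
      by_cases hcond : a = b ∧ last ≠ some a
      · obtain ⟨hab, hlast⟩ := hcond
        subst hab
        obtain ⟨hmem, hpw⟩ := ih (some a) hs'
          (by rintro l hll y hy; cases hll; exact hhead y hy)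
        have hD : pvD last (a :: a :: t') = a :: pvD (some a) (a :: t') := by
          simp [pvD, hlast]
        constructor
        · intro x
          rw [hD]
          simp only [List.mem_cons, hmem]
          constructor
          · rintro (rfl | ⟨hc, hne⟩)
            · refine ⟨?_, hlast⟩
              simp only [List.count_cons, beq_self_eq_true]
              simp
            · have hxa : x ≠ a := fun h => hne (h ▸ rfl)
              have hax : (a == x) = false := beq_eq_false_iff_ne.mpr (Ne.symm hxa)
              have e1 : List.count x (a :: t') = List.count x t' := by
                rw [List.count_cons, hax]; simp
              have e2 : List.count x (a :: a :: t') = List.count x t' := by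
                rw [List.count_cons, hax, e1]; simp
              rw [e1] at hc
              refine ⟨by rw [e2]; omega, ?_⟩
              intro hlx
              have hxin : x ∈ a :: t' := List.count_pos_iff.mp (by rw [e1]; omega)
              have h1 : a ≤ x := hhead x hxin
              have h2 : x ≤ a := hl x hlx a List.mem_cons_self
              exact hxa (le_antisymm h2 h1)
          · rintro ⟨hc, hne⟩
            by_cases hx : x = a
            · exact Or.inl hx
            · refine Or.inr ⟨?_, fun h => hx (Option.some_injective _ h.symm)⟩
              have hax : (a == x) = false := beq_eq_false_iff_ne.mpr (Ne.symm hx)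
              have e1 : List.count x (a :: t') = List.count x t' := by
                rw [List.count_cons, hax]; simp
              have e2 : List.count x (a :: a :: t') = List.count x t' := by
                rw [List.count_cons, hax, e1]; simp
              rw [e2] at hc
              rw [e1]; omega
        · rw [hD]
          refine List.pairwise_cons.mpr ⟨?_, hpw⟩
          intro y hy
          rw [hmem] at hy
          obtain ⟨hc, hne⟩ := hy
          have hyin : y ∈ a :: t' := List.count_pos_iff.mp (by omega)
          have h1 : a ≤ y := hhead y hyin
          have hya : y ≠ a := fun h => hne (h ▸ rfl)
          exact lt_of_le_of_ne h1 (Ne.symm hya)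
      · obtain ⟨hmem, hpw⟩ := ih last hs' (fun l hll y hy => hl l hll y (List.mem_cons_of_mem a hy))
        have hD : pvD last (a :: b :: t') = pvD last (b :: t') := by
          simp only [pvD, if_neg hcond]
        refine ⟨?_, hD ▸ hpw⟩
        intro x
        rw [hD, hmem]
        by_cases hx : x = a
        · subst hx
          by_cases hab : x = b
          · have hlx : last = some x := by
              by_contra h
              exact hcond ⟨hab, h⟩
            constructor
            · rintro ⟨-, hne⟩; exact absurd hlx hne
            · rintro ⟨-, hne⟩; exact absurd hlx hne
          · have hnotin : x ∉ b :: t' := by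
              intro hin
              have h2 : b ≤ x := by
                cases hin with
                | head => exact absurd rfl hab
                | tail _ hx' => exact (List.pairwise_cons.mp hs').1 x hx'
              exact hab (le_antisymm hab_le h2)
            have hc0 : List.count x (b :: t') = 0 := List.count_eq_zero.mpr hnotin
            constructor
            · rintro ⟨hc, -⟩; omega
            · rintro ⟨hc, -⟩
              have hct : List.count x t' = 0 := by
                rw [List.count_cons] at hc0
                omega
              simp only [List.count_cons, beq_self_eq_true] at hc
              have hbx : (b == x) = false := beq_eq_false_iff_ne.mpr (Ne.symm hab)
              simp only [hbx, Bool.false_eq_true, if_false, hct] at hc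
              simp at hc
        · have hax : (a == x) = false := beq_eq_false_iff_ne.mpr (Ne.symm hx)
          have hcc : List.count x (a :: b :: t') = List.count x (b :: t') := by
            rw [List.count_cons, hax]
            simp
          rw [hcc]

theorem pvDupEq (cs : List String) :
    duplicate_values_py cs
      = ((PySem.List.sorted (cs.filter (fun n => !(n == ""))) (fun x => x) false).zip
          (PySem.List.slice (PySem.List.sorted (cs.filter (fun n => !(n == ""))) (fun x => x) false) (some 1) none)).foldl pvDupStep [] := by
  set f := cs.filter (fun n => !(n == "")) with hf
  set o := PySem.List.sorted f (fun x => x) false with ho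
  rw [PySem.List.slice_from_one, pvFoldDup o [], List.getLast?_nil, List.nil_append]
  have hso : o.Pairwise (· ≤ ·) := by
    have := PySem.List.sorted_pairwise f (fun x => x) (κ := String)
    simpa using this
  obtain ⟨hmem, hpw⟩ := pvDSpec o none hso (by intro l h; cases h)
  have hcnt : ∀ x : String, o.count x = f.count x := fun x =>
    (PySem.List.sorted_perm f (fun x => x) false).count_eq x
  -- A's side: sorted of the counter's over-counted keys
  have hitems : duplicate_values_py cs
      = PySem.List.sorted
          ((PySem.Set.ofList f).filter (fun k => decide ((1 : Int) < (f.count k : Int))))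
          (fun x => x) false := by
    simp [duplicate_values_py, PySem.Dict.items_counter, List.filter_map, List.map_map,
      Function.comp_def, hf]
  rw [hitems]
  apply PySem.List.sorted_eq_of_perm_of_pairwise_lt
  · -- (pvD none o).Perm (filtered keys)
    have hnodA : ((PySem.Set.ofList f).filter
        (fun k => decide ((1 : Int) < (f.count k : Int)))).Nodup :=
      (PySem.Set.nodup_ofList f).filter _
    have hnodB : (pvD none o).Nodup := hpw.imp (fun h => ne_of_lt h)
    rw [List.perm_ext_iff_of_nodup hnodB hnodA]
    intro x
    rw [hmem x, List.mem_filter, PySem.Set.mem_ofList, hcnt x]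
    constructor
    · rintro ⟨hc, -⟩
      refine ⟨List.count_pos_iff.mp (by omega), ?_⟩
      simp only [decide_eq_true_eq]
      exact_mod_cast (by omega : 1 < f.count x)
    · rintro ⟨-, hgt⟩
      have : (1 : Int) < (f.count x : Int) := by simpa using hgt
      exact ⟨by exact_mod_cast this, by simp⟩
  · simpa using hpw

-- ===== VERDICT (by name: the statement is the Claim_ definition above) =====
theorem channel_name_errors_py_spec : Claim_equal_channel_name_errors_py := by
  unfold Claim_equal_channel_name_errors_py Spec_channel_name_errors_py
  intro cs _
  unfold channel_name_errors_py channel_name_errors_py_alt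
  by_cases hcs : cs = []
  · simp [hcs]
  · have hdup := pvDupEq cs
    have hbl : (((cs.filter (fun name => PySem.Str.strip name == "")).map pyReprWS) ≠ [])
        ↔ cs.any (fun name => PySem.Str.strip name == "") = true := by
      simp [List.map_eq_nil_iff, List.filter_eq_nil_iff, List.any_eq_true]
    simp only [hcs, ite_not]
    rw [← hdup]
    by_cases hd : duplicate_values_py cs = [] <;>
      by_cases hb : cs.any (fun name => PySem.Str.strip name == "") = true <;>
      by_cases hm : cs.filter (fun name => name.toList.any PySem.Chars.isspace) = [] <;>
        simp_all
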